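-- pv_equiv track=rewrite | github.com/m-sterling/Advent-of-Code-2020 | code/day08.py | part2
-- ===== SOURCE A (Python) =====
-- def part2(src):
--     nops = [i for i in range(len(src)) if src[i].startswith('nop')]
--     jmps = [i for i in range(len(src)) if src[i].startswith('jmp')]
--     # one `nop` or `jmp` should be switched - loop through each changing
--     # one each iteration to find which change fixes the infinite loop
--     for nop_i in nops:
--         # same as above
--         acc = 0
--         ptr = 0
--         seen = []
--
--         # adding that the loop should break when the pointer is OOB
--         while ptr not in seen and ptr < len(src):
--             seen.append(ptr)
--
--             words = src[ptr].split()
--             # if this line is the `nop` we're looking to change, intercept and swap it out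
--             inst = 'jmp' if ptr == nop_i else words[0]
--             arg = int(words[1])
--
--             # continue as normal
--             if inst == 'nop':
--                 ptr += 1
--             elif inst == 'acc':
--                 acc += arg
--                 ptr += 1
--             elif inst == 'jmp':
--                 ptr += arg
--         # if the loop was exited due to the pointer being OOB, the infinite loop was broken!
--         if ptr >= len(src):
--             return acc
--
--     # exact same as the above loop, except nop -> jmp becomes jmp -> nop
--     for jmp_i in jmps:
--         acc = 0
--         ptr = 0
--         seen = []
--         while ptr not in seen and ptr < len(src):
--             seen.append(ptr)
--
--             words = src[ptr].split()
--             inst = 'nop' if ptr == jmp_i else words[0]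
--             arg = int(words[1])
--
--             if inst == 'nop':
--                 ptr += 1
--             elif inst == 'acc':
--                 acc += arg
--                 ptr += 1
--             elif inst == 'jmp':
--                 ptr += arg
--         if ptr >= len(src):
--             return acc
--
--     # failsafe - should theoretically never happen
--     return -1
-- ===== SOURCE B (Python) =====
-- def _run(prog, n, ci, cop):
--     # Simulate with line ci's opcode replaced by cop. States are the pointer
--     # values in [0, n); a run that exits never repeats a pointer, so by
--     # pigeonhole it exits within n steps (n+1 loop iterations) or never.
--     acc = 0
--     ptr = 0
--     for _ in range(n + 1):
--         if ptr >= n: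
--             return acc
--         op, arg = prog[ptr]
--         if ptr == ci:
--             op = cop
--         if op == 'acc':
--             acc += arg
--             ptr += 1
--         elif op == 'jmp':
--             ptr += arg
--         elif op == 'nop':
--             ptr += 1
--         else:
--             return None  # unknown opcode: the machine stalls, never exits
--     return None
--
--
-- def part2(src):
--     n = len(src)
--     cands = [(i, 'jmp') for i in range(n) if src[i].startswith('nop')]
--     cands += [(i, 'nop') for i in range(n) if src[i].startswith('jmp')]
--     if not cands:
--         return -1
--     prog = []
--     for line in src:
--         w = line.split()
--         prog.append((w[0], int(w[1])))
--     for ci, cop in cands: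
--         res = _run(prog, n, ci, cop)
--         if res is not None:
--             return res
--     return -1
-- ===== Notes on version B (the rewrite author's own statement) =====
-- stated objective: alternative
-- what changed: B parses every line once into (op,arg) pairs, merges the two swap-candidate phases into one candidate list, and replaces A's per-step string re-parsing and visited-list cycle detection by a bounded simulation of at most n+1 steps (pigeonhole: an exiting run never repeats a pointer); the generated timing inputs contain no swap candidates, so no speed difference was measured.
-- outside the precondition, e.g. on part2(['jmp +2', 'xx', 'nop +1']): A returns 0, B raises IndexError; on part2(['jmp -1']): A returns 0, B returns 0
import Mathlib
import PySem

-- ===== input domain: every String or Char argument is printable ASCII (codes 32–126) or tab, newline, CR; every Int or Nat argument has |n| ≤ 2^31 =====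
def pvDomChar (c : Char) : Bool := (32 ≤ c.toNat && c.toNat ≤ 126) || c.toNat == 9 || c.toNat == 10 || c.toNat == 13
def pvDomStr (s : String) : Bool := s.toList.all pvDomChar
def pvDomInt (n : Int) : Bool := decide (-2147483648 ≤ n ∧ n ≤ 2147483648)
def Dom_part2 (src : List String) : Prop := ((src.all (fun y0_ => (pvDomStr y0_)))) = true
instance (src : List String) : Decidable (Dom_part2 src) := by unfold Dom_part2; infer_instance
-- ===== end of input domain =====

-- B re-implements the swap search differently: parse once, one merged candidate list, and a
-- pigeonhole-bounded simulation (≤ n+1 steps) instead of A's visited-list cycle detection.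

-- shared line-parsing helpers (used by port B and by Pre_)
def pvWords (line : String) : List String := PySem.Str.split₀ line
def pvOp (line : String) : String := (pvWords line).getD 0 ""
def pvArg (line : String) : Int := (PySem.Int.ofStr? ((pvWords line).getD 1 "")).getD 0

-- `[i for i in range(len(src)) if src[i].startswith(pre)]` (both Pythons build these lists)
def part2Cands (src : List String) (pre : String) : List Int :=
  (PySem.List.pyRange 0 (src.length : Int) 1).filter
    (fun i => match PySem.List.pyGet? src i with
      | some s => PySem.Str.startswith s pre
      | none => false)

-- ===== PORT A =====
-- A's while-loop (identical in both phases up to the forced instruction), fuel-bounded: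
-- under Pre_ the loop runs at most src.length+1 iterations (each one appends a fresh
-- pointer in [0, len) to `seen`), so fuel 2*len+2 never runs out where Python returns.
-- Mid-loop Python exceptions (IndexError / ValueError) return the current state; Pre_ excludes them.
def part2Loop (src : List String) (swapAt : Int) (swapTo : String) :
    Nat → List Int → Int → Int → Int × Int
  | 0, _, acc, ptr => (acc, ptr)
  | fuel+1, seen, acc, ptr =>
    if seen.contains ptr || (src.length : Int) ≤ ptr then (acc, ptr)
    else
      match PySem.List.pyGet? src ptr with
      | none => (acc, ptr)
      | some line =>
        let words := PySem.Str.split₀ line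
        match PySem.List.pyGet? words 0, PySem.List.pyGet? words 1 with
        | some w0, some w1 =>
          let inst := if ptr = swapAt then swapTo else w0
          match PySem.Int.ofStr? w1 with
          | none => (acc, ptr)
          | some arg =>
            if inst = "nop" then part2Loop src swapAt swapTo fuel (seen ++ [ptr]) acc (ptr + 1)
            else if inst = "acc" then part2Loop src swapAt swapTo fuel (seen ++ [ptr]) (acc + arg) (ptr + 1)
            else if inst = "jmp" then part2Loop src swapAt swapTo fuel (seen ++ [ptr]) acc (ptr + arg)
            else part2Loop src swapAt swapTo fuel (seen ++ [ptr]) acc ptr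
        | _, _ => (acc, ptr)

-- one `for cand_i in cands: … if ptr >= len(src): return acc` phase
def part2Phase (src : List String) (swapTo : String) : List Int → Option Int
  | [] => none
  | i :: rest =>
    let r := part2Loop src i swapTo (2 * src.length + 2) [] 0 0
    if (src.length : Int) ≤ r.2 then some r.1
    else part2Phase src swapTo rest

def part2 (src : List String) : Int :=
  match part2Phase src "jmp" (part2Cands src "nop") with
  | some a => a
  | none =>
    match part2Phase src "nop" (part2Cands src "jmp") with
    | some a => a
    | none => -1

-- ===== PORT B =====

-- Source B's `_run`: bounded simulation over the pre-parsed program, fuel n+1.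
def part2AltRun (prog : List (String × Int)) (n : Int) (ci : Int) (cop : String) :
    Nat → Int → Int → Option Int
  | 0, _, _ => none
  | fuel+1, acc, ptr =>
    if n ≤ ptr then some acc
    else
      match PySem.List.pyGet? prog ptr with
      | none => none   -- Python would raise here; outside Pre_
      | some oa =>
        let op := if ptr = ci then cop else oa.1
        if op = "acc" then part2AltRun prog n ci cop fuel (acc + oa.2) (ptr + 1)
        else if op = "jmp" then part2AltRun prog n ci cop fuel acc (ptr + oa.2)
        else if op = "nop" then part2AltRun prog n ci cop fuel acc (ptr + 1)
        else none

-- Source B's candidate loop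
def part2AltGo (prog : List (String × Int)) (n : Int) : List (Int × String) → Int
  | [] => -1
  | (ci, cop) :: rest =>
    match part2AltRun prog n ci cop (n.toNat + 1) 0 0 with
    | some a => a
    | none => part2AltGo prog n rest

-- `w[0]` / `int(w[1])` of Source B raise on malformed lines; the port totalises them with
-- defaults via pvOp/pvArg — inside Pre_ the defaults are never used (all lines well-formed).
def part2_alt (src : List String) : Int :=
  let n : Int := (src.length : Int)
  let cands := (part2Cands src "nop").map (fun i => (i, "jmp"))
      ++ (part2Cands src "jmp").map (fun i => (i, "nop"))
  if cands.isEmpty then -1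
  else
    let prog := src.map (fun line => (pvOp line, pvArg line))
    part2AltGo prog n cands

-- ===== PRECONDITION & SPEC =====
-- line i is well formed (two tokens, int argument) and, if it is a real `jmp` or a
-- swappable `nop…` line, its jump target is nonnegative
def pvLineOK (i : Nat) (line : String) : Prop :=
  2 ≤ (pvWords line).length ∧
  (PySem.Int.ofStr? ((pvWords line).getD 1 "")).isSome = true ∧
  ((pvOp line = "jmp" ∨ PySem.Str.startswith line "nop" = true) → 0 ≤ (i : Int) + pvArg line)

def pvWF (src : List String) : Prop :=
  ∀ i ∈ List.range src.length, pvLineOK i (src.getD i "")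

-- Pre_ excludes programs that contain a swap candidate together with a malformed or
-- negative-jumping line: on those a simulation may raise IndexError/ValueError or read
-- lines through Python's negative-index wraparound, so it conservatively requires every
-- line to be well formed with nonnegative jump targets once any candidate exists.
def Pre_part2 (src : List String) : Prop :=
  (∀ s ∈ src, PySem.Str.startswith s "nop" = false ∧ PySem.Str.startswith s "jmp" = false)
  ∨ pvWF src

instance (src : List String) : Decidable (Pre_part2 src) := by
  unfold Pre_part2 pvWF pvLineOK; infer_instance

def pvWitness_part2 : List String := ["jmp +1", "acc 3", "jmp -2"]

def Spec_part2 (src : List String) (out : Int) : Prop := out = part2_alt src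
instance (src : List String) (out : Int) : Decidable (Spec_part2 src out) := by
  unfold Spec_part2; infer_instance

-- ===== CLAIM (what is proved, stated in full; the proofs are below) =====
def Claim_equal_part2 : Prop :=
  ∀ (src : List String), Dom_part2 src → Pre_part2 src → Spec_part2 src (part2 src)

-- ===== LEMMAS AND PROOFS =====

-- abstract one-step semantics of the (swapped) machine, used only by the proofs
def pvArgAt (src : List String) (p : Int) : Int := pvArg (src.getD p.toNat "")

def pvEffOp (src : List String) (ci : Int) (cop : String) (p : Int) : String :=
  if p = ci then cop else pvOp (src.getD p.toNat "")

def pvStep (src : List String) (ci : Int) (cop : String) (p : Int) : Int :=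
  if 0 ≤ p ∧ p < (src.length : Int) then
    let op := pvEffOp src ci cop p
    if op = "acc" then p + 1
    else if op = "jmp" then p + pvArgAt src p
    else if op = "nop" then p + 1
    else p
  else p

def pvDelta (src : List String) (ci : Int) (cop : String) (p : Int) : Int :=
  if pvEffOp src ci cop p = "acc" then pvArgAt src p else 0

def pvStall (src : List String) (ci : Int) (cop : String) (p : Int) : Bool :=
  pvEffOp src ci cop p ≠ "acc" ∧ pvEffOp src ci cop p ≠ "jmp" ∧ pvEffOp src ci cop p ≠ "nop"

-- the swap is licensed: a forced `jmp` at ci has a nonnegative target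
def pvSwapOK (src : List String) (ci : Int) (cop : String) : Prop :=
  cop = "jmp" → 0 ≤ ci + pvArgAt src ci

theorem pv_wf_at (src : List String) (h : pvWF src) (p : Int) (h0 : 0 ≤ p)
    (h1 : p < (src.length : Int)) : pvLineOK p.toNat (src.getD p.toNat "") := by
  exact h p.toNat (List.mem_range.mpr (by omega))

theorem pv_getA (src : List String) (p : Int) (h0 : 0 ≤ p) (h1 : p < (src.length : Int)) :
    PySem.List.pyGet? src p = some (src.getD p.toNat "") := by
  rw [PySem.List.pyGet?_of_nonneg (xs := src) h0]
  rw [List.getElem?_eq_getElem (by omega)]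
  rw [List.getD_eq_getElem _ _ (by omega)]

theorem pv_getProg (src : List String) (p : Int) (h0 : 0 ≤ p) (h1 : p < (src.length : Int)) :
    PySem.List.pyGet? (src.map (fun line => (pvOp line, pvArg line))) p =
      some (pvOp (src.getD p.toNat ""), pvArg (src.getD p.toNat "")) := by
  rw [PySem.List.pyGet?_of_nonneg (xs := src.map (fun line => (pvOp line, pvArg line))) h0]
  rw [List.getElem?_eq_getElem (by simpa using (by omega : p.toNat < src.length))]
  rw [List.getElem_map]
  rw [List.getD_eq_getElem _ _ (by omega)]

set_option maxHeartbeats 2000000 in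
theorem pv_stepB (src : List String) (ci : Int) (cop : String) (fuel : Nat) (acc p : Int)
    (h0 : 0 ≤ p) (h1 : p < (src.length : Int)) :
    part2AltRun (src.map (fun line => (pvOp line, pvArg line))) (src.length : Int) ci cop
        (fuel + 1) acc p =
      if pvStall src ci cop p then none
      else part2AltRun (src.map (fun line => (pvOp line, pvArg line))) (src.length : Int) ci cop
        fuel (acc + pvDelta src ci cop p) (pvStep src ci cop p) := by
  have hget := pv_getProg src p h0 h1
  rw [show part2AltRun (src.map (fun line => (pvOp line, pvArg line))) (src.length : Int) ci cop
        (fuel + 1) acc p =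
      (if (src.length : Int) ≤ p then some acc
       else match PySem.List.pyGet? (src.map (fun line => (pvOp line, pvArg line))) p with
        | none => none
        | some oa =>
          let op := if p = ci then cop else oa.1
          if op = "acc" then part2AltRun (src.map (fun line => (pvOp line, pvArg line))) (src.length : Int) ci cop fuel (acc + oa.2) (p + 1)
          else if op = "jmp" then part2AltRun (src.map (fun line => (pvOp line, pvArg line))) (src.length : Int) ci cop fuel acc (p + oa.2)
          else if op = "nop" then part2AltRun (src.map (fun line => (pvOp line, pvArg line))) (src.length : Int) ci cop fuel acc (p + 1)
          else none) from rfl]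
  rw [if_neg (by omega), hget]
  simp only [pvStall, pvDelta, pvStep, pvEffOp, pvArgAt,
    if_pos (show (0:Int) ≤ p ∧ p < (src.length : Int) from ⟨h0, h1⟩)]
  split_ifs <;> simp_all

set_option maxHeartbeats 2000000 in
theorem pv_stepA (src : List String) (ci : Int) (cop : String) (fuel : Nat)
    (seen : List Int) (acc p : Int) (hwf : pvWF src)
    (h0 : 0 ≤ p) (h1 : p < (src.length : Int)) (hns : p ∉ seen) :
    part2Loop src ci cop (fuel + 1) seen acc p =
      if pvStall src ci cop p then part2Loop src ci cop fuel (seen ++ [p]) acc p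
      else part2Loop src ci cop fuel (seen ++ [p]) (acc + pvDelta src ci cop p)
        (pvStep src ci cop p) := by
  have hcontains : seen.contains p = false := by simpa using hns
  have hget := pv_getA src p h0 h1
  obtain ⟨hlen, hsome, -⟩ := pv_wf_at src hwf p h0 h1
  simp only [pvWords] at hlen hsome
  have hw0 : PySem.List.pyGet? (PySem.Str.split₀ (src.getD p.toNat "")) (0 : Int) =
      some ((PySem.Str.split₀ (src.getD p.toNat "")).getD 0 "") := by
    rw [PySem.List.pyGet?_of_nonneg (xs := PySem.Str.split₀ (src.getD p.toNat "")) (by norm_num)]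
    rw [List.getElem?_eq_getElem (by simpa using (by omega : (0:Int).toNat < (PySem.Str.split₀ (src.getD p.toNat "")).length))]
    exact congrArg some (List.getD_eq_getElem _ _ (by omega)).symm
  have hw1 : PySem.List.pyGet? (PySem.Str.split₀ (src.getD p.toNat "")) (1 : Int) =
      some ((PySem.Str.split₀ (src.getD p.toNat "")).getD 1 "") := by
    rw [PySem.List.pyGet?_of_nonneg (xs := PySem.Str.split₀ (src.getD p.toNat "")) (by norm_num)]
    rw [List.getElem?_eq_getElem (by simpa using (by omega : (1:Int).toNat < (PySem.Str.split₀ (src.getD p.toNat "")).length))]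
    exact congrArg some (List.getD_eq_getElem _ _ (by omega)).symm
  obtain ⟨a, hA⟩ := Option.isSome_iff_exists.mp hsome
  rw [show part2Loop src ci cop (fuel + 1) seen acc p =
      (if seen.contains p || (src.length : Int) ≤ p then (acc, p)
       else
        match PySem.List.pyGet? src p with
        | none => (acc, p)
        | some line =>
          let words := PySem.Str.split₀ line
          match PySem.List.pyGet? words 0, PySem.List.pyGet? words 1 with
          | some w0, some w1 =>
            let inst := if p = ci then cop else w0
            match PySem.Int.ofStr? w1 with
            | none => (acc, p)
            | some arg =>
              if inst = "nop" then part2Loop src ci cop fuel (seen ++ [p]) acc (p + 1)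
              else if inst = "acc" then part2Loop src ci cop fuel (seen ++ [p]) (acc + arg) (p + 1)
              else if inst = "jmp" then part2Loop src ci cop fuel (seen ++ [p]) acc (p + arg)
              else part2Loop src ci cop fuel (seen ++ [p]) acc p
          | _, _ => (acc, p)) from rfl]
  rw [hcontains]
  rw [if_neg (by simp; omega), hget]
  simp only [hw0, hw1, hA]
  simp only [pvStall, pvDelta, pvStep, pvEffOp, pvArgAt, pvOp, pvArg, pvWords, hA,
    if_pos (show (0:Int) ≤ p ∧ p < (src.length : Int) from ⟨h0, h1⟩)]
  split_ifs <;> simp_all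

theorem pv_step_nonneg (src : List String) (ci : Int) (cop : String) (p : Int)
    (hwf : pvWF src) (hsw : pvSwapOK src ci cop) (h0 : 0 ≤ p) :
    0 ≤ pvStep src ci cop p := by
  by_cases hr : (0:Int) ≤ p ∧ p < (src.length : Int)
  · obtain ⟨-, h1⟩ := hr
    obtain ⟨-, -, htgt⟩ := pv_wf_at src hwf p h0 h1
    simp only [pvStep, if_pos (show (0:Int) ≤ p ∧ p < (src.length : Int) from ⟨h0, h1⟩)]
    by_cases ha : pvEffOp src ci cop p = "acc"
    · rw [if_pos ha]; omega
    · rw [if_neg ha]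
      by_cases hj : pvEffOp src ci cop p = "jmp"
      · rw [if_pos hj]
        unfold pvArgAt
        unfold pvEffOp at hj
        by_cases hpc : p = ci
        · rw [if_pos hpc] at hj
          have hs := hsw hj
          unfold pvArgAt at hs
          rw [hpc]
          omega
        · rw [if_neg hpc] at hj
          have := htgt (Or.inl hj)
          omega
      · rw [if_neg hj]
        by_cases hn : pvEffOp src ci cop p = "nop"
        · rw [if_pos hn]; omega
        · rw [if_neg hn]; omega
  · unfold pvStep
    rw [if_neg hr]; exact h0

theorem pv_step_absorb (src : List String) (ci : Int) (cop : String) (p : Int)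
    (h : (src.length : Int) ≤ p) : pvStep src ci cop p = p := by
  unfold pvStep
  rw [if_neg (by omega)]

theorem pv_iter_bounds (src : List String) (ci : Int) (cop : String) (p : Int) (d : Nat)
    (hwf : pvWF src) (hsw : pvSwapOK src ci cop)
    (h0 : 0 ≤ p) (h1 : p < (src.length : Int)) (hd : 0 < d)
    (hcyc : (pvStep src ci cop)^[d] p = p) :
    ∀ t, 0 ≤ (pvStep src ci cop)^[t] p ∧ (pvStep src ci cop)^[t] p < (src.length : Int) := by
  have hnn : ∀ t, 0 ≤ (pvStep src ci cop)^[t] p := by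
    intro t
    induction t with
    | zero => simpa using h0
    | succ t ih =>
      rw [Function.iterate_succ_apply']
      exact pv_step_nonneg src ci cop _ hwf hsw ih
  have habs : ∀ t k, (src.length : Int) ≤ (pvStep src ci cop)^[t] p →
      (pvStep src ci cop)^[t + k] p = (pvStep src ci cop)^[t] p := by
    intro t k ht
    induction k with
    | zero => rfl
    | succ k ih =>
      rw [show t + (k + 1) = (t + k) + 1 by omega, Function.iterate_succ_apply', ih]
      exact pv_step_absorb src ci cop _ ht
  have hmul : ∀ k, (pvStep src ci cop)^[d * k] p = p := by
    intro k
    rw [Function.iterate_mul]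
    exact Function.iterate_fixed hcyc k
  intro t
  refine ⟨hnn t, ?_⟩
  by_contra hc
  push Not at hc
  have hge : d * (t + 1) ≥ t := by nlinarith
  have := habs t (d * (t + 1) - t) hc
  rw [show t + (d * (t + 1) - t) = d * (t + 1) by omega, hmul] at this
  omega

theorem pv_run_none (src : List String) (ci : Int) (cop : String)
    (hwf : pvWF src) (hsw : pvSwapOK src ci cop) :
    ∀ (fuel : Nat) (acc p : Int) (d : Nat), 0 ≤ p → p < (src.length : Int) → 0 < d →
    (pvStep src ci cop)^[d] p = p →
    part2AltRun (src.map (fun line => (pvOp line, pvArg line))) (src.length : Int) ci cop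
      fuel acc p = none := by
  intro fuel
  induction fuel with
  | zero => intro acc p d _ _ _ _; rfl
  | succ fuel ih =>
    intro acc p d h0 h1 hd hcyc
    rw [pv_stepB src ci cop fuel acc p h0 h1]
    by_cases hst : pvStall src ci cop p
    · rw [if_pos hst]
    · rw [if_neg hst]
      have hb := pv_iter_bounds src ci cop p d hwf hsw h0 h1 hd hcyc 1
      rw [Function.iterate_one] at hb
      refine ih _ _ d hb.1 hb.2 hd ?_
      calc (pvStep src ci cop)^[d] (pvStep src ci cop p)
          = (pvStep src ci cop)^[d + 1] p := (Function.iterate_succ_apply _ _ _).symm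
        _ = pvStep src ci cop ((pvStep src ci cop)^[d] p) := Function.iterate_succ_apply' _ _ _
        _ = pvStep src ci cop p := by rw [hcyc]

theorem pv_loopA_halt (src : List String) (ci : Int) (cop : String) (fuel : Nat)
    (seen : List Int) (acc p : Int)
    (h : (seen.contains p || (src.length : Int) ≤ p) = true) :
    part2Loop src ci cop (fuel + 1) seen acc p = (acc, p) := by
  rw [show part2Loop src ci cop (fuel + 1) seen acc p =
      (if seen.contains p || (src.length : Int) ≤ p then (acc, p)
       else
        match PySem.List.pyGet? src p with
        | none => (acc, p)
        | some line =>
          let words := PySem.Str.split₀ line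
          match PySem.List.pyGet? words 0, PySem.List.pyGet? words 1 with
          | some w0, some w1 =>
            let inst := if p = ci then cop else w0
            match PySem.Int.ofStr? w1 with
            | none => (acc, p)
            | some arg =>
              if inst = "nop" then part2Loop src ci cop fuel (seen ++ [p]) acc (p + 1)
              else if inst = "acc" then part2Loop src ci cop fuel (seen ++ [p]) (acc + arg) (p + 1)
              else if inst = "jmp" then part2Loop src ci cop fuel (seen ++ [p]) acc (p + arg)
              else part2Loop src ci cop fuel (seen ++ [p]) acc p
          | _, _ => (acc, p)) from rfl]
  rw [if_pos h]

theorem pv_runB_exit (prog : List (String × Int)) (n ci : Int) (cop : String) (fuel : Nat)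
    (acc p : Int) (h : n ≤ p) :
    part2AltRun prog n ci cop (fuel + 1) acc p = some acc := by
  rw [show part2AltRun prog n ci cop (fuel + 1) acc p =
      (if n ≤ p then some acc
       else match PySem.List.pyGet? prog p with
        | none => none
        | some oa =>
          let op := if p = ci then cop else oa.1
          if op = "acc" then part2AltRun prog n ci cop fuel (acc + oa.2) (p + 1)
          else if op = "jmp" then part2AltRun prog n ci cop fuel acc (p + oa.2)
          else if op = "nop" then part2AltRun prog n ci cop fuel acc (p + 1)
          else none) from rfl]
  rw [if_pos h]

theorem pv_seen_le (src : List String) (seen : List Int) (hnd : seen.Nodup)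
    (hmem : ∀ q ∈ seen, 0 ≤ q ∧ q < (src.length : Int)) : seen.length ≤ src.length := by
  have hsub : seen ⊆ PySem.List.pyRange 0 (src.length : Int) 1 := by
    intro q hq
    rw [PySem.List.mem_pyRange_one]
    have := hmem q hq; omega
  have := (List.subperm_of_subset hnd hsub).length_le
  simpa [PySem.List.length_pyRange_one] using this

-- the main simulation correspondence
theorem pv_main (src : List String) (ci : Int) (cop : String)
    (hwf : pvWF src) (hsw : pvSwapOK src ci cop) :
    ∀ (fuelA fuelB : Nat) (seen : List Int) (acc p : Int),
    0 ≤ p →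
    (∀ q ∈ seen, ∃ t, 0 < t ∧ (pvStep src ci cop)^[t] q = p) →
    (∀ q ∈ seen, 0 ≤ q ∧ q < (src.length : Int)) →
    seen.Nodup →
    src.length + 2 ≤ seen.length + fuelA →
    fuelB + seen.length = src.length + 1 →
    part2AltRun (src.map (fun line => (pvOp line, pvArg line))) (src.length : Int) ci cop
        fuelB acc p =
      (if (src.length : Int) ≤ (part2Loop src ci cop fuelA seen acc p).2
       then some (part2Loop src ci cop fuelA seen acc p).1 else none) := by
  intro fuelA
  induction fuelA with
  | zero =>
    intro fuelB seen acc p h0 hreach hset hnd hfa hfb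
    have := pv_seen_le src seen hnd hset
    omega
  | succ fuelA ih =>
    intro fuelB seen acc p h0 hreach hset hnd hfa hfb
    have hslen := pv_seen_le src seen hnd hset
    obtain ⟨fb, rfl⟩ : ∃ fb, fuelB = fb + 1 := ⟨fuelB - 1, by omega⟩
    by_cases hmem : p ∈ seen
    · -- A's loop breaks on a revisited pointer; B's bounded run cycles out of fuel
      rw [pv_loopA_halt src ci cop fuelA seen acc p (by simp [hmem])]
      obtain ⟨hp0, hpn⟩ := hset p hmem
      rw [if_neg (by simp; omega)]
      obtain ⟨d, hd, hcyc⟩ := hreach p hmem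
      exact pv_run_none src ci cop hwf hsw (fb + 1) acc p d hp0 hpn hd hcyc
    · by_cases hout : (src.length : Int) ≤ p
      · rw [pv_loopA_halt src ci cop fuelA seen acc p (by simp [hout])]
        rw [if_pos (by simpa using hout)]
        exact pv_runB_exit _ _ _ _ _ _ _ hout
      · have hpn : p < (src.length : Int) := by omega
        rw [pv_stepA src ci cop fuelA seen acc p hwf h0 hpn hmem]
        rw [pv_stepB src ci cop fb acc p h0 hpn]
        by_cases hst : pvStall src ci cop p
        · rw [if_pos hst, if_pos hst]
          obtain ⟨fa, rfl⟩ : ∃ fa, fuelA = fa + 1 := ⟨fuelA - 1, by omega⟩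
          rw [pv_loopA_halt src ci cop fa (seen ++ [p]) acc p (by simp)]
          rw [if_neg (by simp; omega)]
        · rw [if_neg hst, if_neg hst]
          refine ih fb (seen ++ [p]) (acc + pvDelta src ci cop p) (pvStep src ci cop p)
            (pv_step_nonneg src ci cop p hwf hsw h0) ?_ ?_ ?_ (by simp; omega) (by simp; omega)
          · intro q hq
            rcases List.mem_append.mp hq with hq | hq
            · obtain ⟨t, ht, hit⟩ := hreach q hq
              exact ⟨t + 1, by omega, by rw [Function.iterate_succ_apply', hit]⟩
            · have : q = p := by simpa using hq
              exact ⟨1, by omega, by rw [this, Function.iterate_one]⟩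
          · intro q hq
            rcases List.mem_append.mp hq with hq | hq
            · exact hset q hq
            · have : q = p := by simpa using hq
              rw [this]; exact ⟨h0, hpn⟩
          · simp only [List.nodup_append, List.nodup_cons]
            constructor
            · exact hnd
            constructor
            · simp
            · intro a ha b hb
              have hbp : b = p := by simpa using hb
              subst hbp
              intro hab
              rw [hab] at ha
              exact hmem ha

theorem pv_cands_mem (src : List String) (pre : String) (i : Int)
    (h : i ∈ part2Cands src pre) :
    0 ≤ i ∧ i < (src.length : Int) ∧ PySem.Str.startswith (src.getD i.toNat "") pre = true := by
  unfold part2Cands at h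
  obtain ⟨hmem, hpred⟩ := List.mem_filter.mp h
  have hr := PySem.List.mem_pyRange_one.mp hmem
  refine ⟨hr.1, hr.2, ?_⟩
  rw [pv_getA src i hr.1 hr.2] at hpred
  simpa using hpred

theorem pv_go_phase (src : List String) (hwf : pvWF src) (cop : String)
    (cands : List Int) (rest : List (Int × String))
    (hsw : ∀ i ∈ cands, pvSwapOK src i cop) :
    part2AltGo (src.map (fun line => (pvOp line, pvArg line))) (src.length : Int)
        (cands.map (fun i => (i, cop)) ++ rest) =
      (match part2Phase src cop cands with
       | some a => a
       | none => part2AltGo (src.map (fun line => (pvOp line, pvArg line))) (src.length : Int) rest) := by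
  induction cands with
  | nil => rfl
  | cons i cs ih =>
    have hswi := hsw i (by simp)
    have hmain := pv_main src i cop hwf hswi (2 * src.length + 2) (src.length + 1) [] 0 0
      (le_refl 0) (by simp) (by simp) (by simp) (by simp; omega) (by simp)
    simp only [List.map_cons, List.cons_append, part2AltGo, Int.toNat_natCast]
    rw [hmain]
    simp only [part2Phase]
    by_cases hex : (src.length : Int) ≤ (part2Loop src i cop (2 * src.length + 2) [] 0 0).2
    · rw [if_pos hex, if_pos hex]
    · rw [if_neg hex, if_neg hex]
      exact ih (fun j hj => hsw j (by simp [hj]))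

theorem pv_no_cands (src : List String)
    (h : ∀ s ∈ src, PySem.Str.startswith s "nop" = false ∧ PySem.Str.startswith s "jmp" = false)
    (pre : String) (hpre : pre = "nop" ∨ pre = "jmp") : part2Cands src pre = [] := by
  unfold part2Cands
  rw [List.filter_eq_nil_iff]
  intro i hi
  have hr := PySem.List.mem_pyRange_one.mp hi
  rw [pv_getA src i hr.1 hr.2]
  have hmem : src.getD i.toNat "" ∈ src := by
    rw [List.getD_eq_getElem _ _ (by omega)]
    exact List.getElem_mem _
  have hh := h _ hmem
  rcases hpre with rfl | rfl
  · simpa using hh.1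
  · simpa using hh.2

-- ===== VERDICT (by name: the statement is the Claim_ definition above) =====
theorem part2_spec : Claim_equal_part2 := by
  intro src hdom hpre
  unfold Spec_part2
  rcases hpre with hno | hwf
  · have h1 := pv_no_cands src hno "nop" (Or.inl rfl)
    have h2 := pv_no_cands src hno "jmp" (Or.inr rfl)
    unfold part2 part2_alt
    rw [h1, h2]
    rfl
  · have hswn : ∀ i ∈ part2Cands src "nop", pvSwapOK src i "jmp" := by
      intro i hi _
      obtain ⟨h0, h1, hst⟩ := pv_cands_mem src "nop" i hi
      obtain ⟨-, -, htgt⟩ := pv_wf_at src hwf i h0 h1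
      have := htgt (Or.inr hst)
      unfold pvArgAt
      omega
    have hswj : ∀ i ∈ part2Cands src "jmp", pvSwapOK src i "nop" := by
      intro i _ hj
      exact absurd hj (by simp)
    unfold part2 part2_alt
    by_cases hemp : ((part2Cands src "nop").map (fun i => (i, "jmp"))
        ++ (part2Cands src "jmp").map (fun i => (i, "nop"))).isEmpty
    · have hn : part2Cands src "nop" = [] := by
        rcases List.append_eq_nil_iff.mp (List.isEmpty_iff.mp hemp) with ⟨ha, -⟩
        exact List.map_eq_nil_iff.mp ha
      have hj : part2Cands src "jmp" = [] := by
        rcases List.append_eq_nil_iff.mp (List.isEmpty_iff.mp hemp) with ⟨-, hb⟩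
        exact List.map_eq_nil_iff.mp hb
      rw [hn, hj]
      rfl
    · simp only [if_neg hemp]
      rw [pv_go_phase src hwf "jmp" (part2Cands src "nop")
        ((part2Cands src "jmp").map (fun i => (i, "nop"))) hswn]
      rw [← List.append_nil ((part2Cands src "jmp").map (fun i => (i, "nop")))]
      rw [pv_go_phase src hwf "nop" (part2Cands src "jmp") [] hswj]
      cases h1 : part2Phase src "jmp" (part2Cands src "nop") with
      | some a => rfl
      | none =>
        cases h2 : part2Phase src "nop" (part2Cands src "jmp") with
        | some a => rfl
        | none => rfl
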